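-- pv_equiv track=rewrite | github.com/serre-ai/research | projects/agent-failure-taxonomy/src/utils/failure_detection.py | detect_infinite_loop
-- ===== SOURCE A (Python) =====
-- from typing import Any, Dict, List, Optional, Tuple
--
-- def detect_infinite_loop(
--     trace: List[Dict[str, Any]], repeat_threshold: int = 3
-- ) -> bool:
--     """
--     Detect if agent repeated the same action multiple times.
--
--     Args:
--         trace: Agent execution trace
--         repeat_threshold: Number of repeats to consider a loop
--
--     Returns:
--         True if infinite loop detected
--     """
--     if len(trace) < repeat_threshold:
--         return False
--
--     # Check for exact action repetition
--     for i in range(len(trace) - repeat_threshold + 1):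
--         actions = [
--             trace[i + j].get("action") for j in range(repeat_threshold)
--         ]
--         if len(set(actions)) == 1 and actions[0] != "Final Answer":
--             return True
--
--     # Check for action-observation cycles (e.g., search -> read same page -> search again)
--     if len(trace) >= 6:
--         for i in range(len(trace) - 5):
--             # Pattern: action1, action2, action1, action2, action1, action2
--             a1 = trace[i].get("action")
--             a2 = trace[i + 1].get("action")
--             if (
--                 a1
--                 and a2
--                 and a1 != a2
--                 and trace[i + 2].get("action") == a1
--                 and trace[i + 3].get("action") == a2
--                 and trace[i + 4].get("action") == a1
--             ):
--                 return True
--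
--     return False
-- ===== SOURCE B (Python) =====
-- def detect_infinite_loop(trace, repeat_threshold=3):
--     n = len(trace)
--     if n < repeat_threshold:
--         return False
--
--     # extract every action once
--     acts = [step.get("action") for step in trace]
--
--     # single-pass run-length counter over consecutive equal actions
--     if repeat_threshold >= 1:
--         run, prev = 0, None
--         for a in acts:
--             run = run + 1 if run and a == prev else 1
--             prev = a
--             if run >= repeat_threshold and a != "Final Answer":
--                 return True
--
--     # check for action-observation cycles (windowed scan over the action list)
--     if n >= 6:
--         for i in range(n - 5):
--             a1 = acts[i]
--             a2 = acts[i + 1]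
--             if (a1 and a2 and a1 != a2 and acts[i + 2] == a1
--                     and acts[i + 3] == a2 and acts[i + 4] == a1):
--                 return True
--
--     return False
-- ===== Notes on version B (the rewrite author's own statement) =====
-- stated objective: alternative
-- what changed: B extracts the action list once and replaces A's per-index rebuild of a length-threshold window list plus a set by a single-pass run-length counter over consecutive equal actions; the cycle scan indexes the precomputed action list instead of repeating dict lookups.
import Mathlib
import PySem

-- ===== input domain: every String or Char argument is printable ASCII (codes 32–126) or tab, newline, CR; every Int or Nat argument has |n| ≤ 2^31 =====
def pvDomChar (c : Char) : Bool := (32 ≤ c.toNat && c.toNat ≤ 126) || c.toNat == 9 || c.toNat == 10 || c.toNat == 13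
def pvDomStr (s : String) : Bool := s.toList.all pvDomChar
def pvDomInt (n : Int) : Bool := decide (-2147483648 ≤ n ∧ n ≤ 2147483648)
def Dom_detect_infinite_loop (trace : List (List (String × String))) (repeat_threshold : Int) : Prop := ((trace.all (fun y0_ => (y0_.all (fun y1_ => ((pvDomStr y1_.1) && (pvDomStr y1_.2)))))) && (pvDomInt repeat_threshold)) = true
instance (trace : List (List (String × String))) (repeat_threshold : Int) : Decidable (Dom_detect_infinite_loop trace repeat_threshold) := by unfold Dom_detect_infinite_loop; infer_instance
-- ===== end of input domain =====

-- B extracts the action list once and replaces A's rebuild-a-window-list-and-set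
-- repetition check by a single-pass run-length counter over consecutive equal actions;
-- its cycle scan indexes the precomputed action list instead of re-doing dict lookups.

-- step.get("action")  (shared by both ports)
def pvAct (step : List (String × String)) : Option String :=
  (PySem.Dict.mk step).get? "action"

-- Python truthiness of a str-or-None value (shared by both ports)
def pvTruthy : Option String → Bool
  | none => false
  | some s => !(s == "")

-- A's action-observation cycle scan.  Indices i..i+4 are provably in range
-- (i < len - 5), so trace[i+j] is ported with pyGetD (exact there).
def pvCycle (trace : List (List (String × String))) : Bool :=
  (PySem.List.pyRange 0 ((trace.length : Int) - 5) 1).any (fun i =>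
    let a1 := pvAct (PySem.List.pyGetD trace i [])
    let a2 := pvAct (PySem.List.pyGetD trace (i + 1) [])
    pvTruthy a1 && pvTruthy a2 && !(a1 == a2) &&
      (pvAct (PySem.List.pyGetD trace (i + 2) []) == a1) &&
      (pvAct (PySem.List.pyGetD trace (i + 3) []) == a2) &&
      (pvAct (PySem.List.pyGetD trace (i + 4) []) == a1))

-- ===== PORT A =====
-- trace[i+j] is provably in range inside the loop, so pyGetD is exact there;
-- 'actions[0]' is only evaluated when the set check passed (actions nonempty), so headD is exact.
def detect_infinite_loop (trace : List (List (String × String))) (repeat_threshold : Int) : Bool :=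
  if (trace.length : Int) < repeat_threshold then false
  else
    let phase1 := (PySem.List.pyRange 0 ((trace.length : Int) - repeat_threshold + 1) 1).any (fun i =>
      let actions := (PySem.List.pyRange 0 repeat_threshold 1).map
        (fun j => pvAct (PySem.List.pyGetD trace (i + j) []))
      decide ((PySem.Set.ofList actions).length = 1) &&
        !(actions.headD none == some "Final Answer"))
    if phase1 then true
    else if (6 : Int) ≤ (trace.length : Int) then pvCycle trace
    else false

-- ===== PORT B =====
-- the single-pass run-length loop of Source B, over the precomputed action list
def pvRunB (thr : Int) : List (Option String) → Int → Option String → Bool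
  | [], _, _ => false
  | a :: rest, run, prev =>
    let run' := if run ≠ 0 ∧ a = prev then run + 1 else 1
    if thr ≤ run' ∧ a ≠ some "Final Answer" then true
    else pvRunB thr rest run' a

-- Source B's cycle scan over the precomputed action list (indices provably in range)
def pvCycleB (acts : List (Option String)) : Bool :=
  (PySem.List.pyRange 0 ((acts.length : Int) - 5) 1).any (fun i =>
    let a1 := PySem.List.pyGetD acts i none
    let a2 := PySem.List.pyGetD acts (i + 1) none
    pvTruthy a1 && pvTruthy a2 && !(a1 == a2) &&
      (PySem.List.pyGetD acts (i + 2) none == a1) &&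
      (PySem.List.pyGetD acts (i + 3) none == a2) &&
      (PySem.List.pyGetD acts (i + 4) none == a1))

def detect_infinite_loop_alt (trace : List (List (String × String))) (repeat_threshold : Int) : Bool :=
  if (trace.length : Int) < repeat_threshold then false
  else
    let acts := trace.map pvAct
    if 1 ≤ repeat_threshold ∧ pvRunB repeat_threshold acts 0 none = true then true
    else if (6 : Int) ≤ (trace.length : Int) then pvCycleB acts
    else false

-- ===== PRECONDITION & SPEC =====
def Spec_detect_infinite_loop (trace : List (List (String × String))) (repeat_threshold : Int) (out : Bool) : Prop := out = detect_infinite_loop_alt trace repeat_threshold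
instance (trace : List (List (String × String))) (repeat_threshold : Int) (out : Bool) : Decidable (Spec_detect_infinite_loop trace repeat_threshold out) := by unfold Spec_detect_infinite_loop; infer_instance

-- ===== CLAIM (what is proved, stated in full; the proofs are below) =====
def Claim_equal_detect_infinite_loop : Prop := ∀ (trace : List (List (String × String))) (repeat_threshold : Int), Dom_detect_infinite_loop trace repeat_threshold → Spec_detect_infinite_loop trace repeat_threshold (detect_infinite_loop trace repeat_threshold)

-- ===== LEMMAS AND PROOFS =====

-- proof-side: A's windowed repetition check as a structural recursion over the action list
def pvAP (k : Nat) : List (Option String) → Bool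
  | [] => false
  | a :: rest =>
    (decide (k ≤ rest.length + 1) && (rest.take (k - 1)).all (fun y => y == a) &&
      !(a == some "Final Answer")) || pvAP k rest

-- the body of A's phase-1 check as a function of the window only
def pvW (w : List (Option String)) : Bool :=
  decide ((PySem.Set.ofList w).length = 1) && !(w.headD none == some "Final Answer")

theorem pvAP_short (k : Nat) (l : List (Option String)) (h : l.length < k) : pvAP k l = false := by
  induction l with
  | nil => rfl
  | cons a rest ih =>
    simp only [pvAP, ih (by simp at h ⊢; omega)]
    simp at h ⊢
    omega

theorem pvAP_FA (k : Nat) : ∀ r : Nat,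
    pvAP k (List.replicate r (some "Final Answer")) = false := by
  intro r
  induction r with
  | zero => rfl
  | succ r ih =>
    simp only [List.replicate_succ, pvAP, ih]
    simp

theorem pvAP_run_true (k r : Nat) (hk : 1 ≤ k) (hkr : k ≤ r) (p : Option String)
    (hp : p ≠ some "Final Answer") (rest : List (Option String)) :
    pvAP k (List.replicate r p ++ rest) = true := by
  have hr : r = (r - 1) + 1 := by omega
  rw [hr, List.replicate_succ, List.cons_append]
  simp only [pvAP, Bool.or_eq_true, Bool.and_eq_true]
  left
  refine ⟨⟨by simp; omega, ?_⟩, by simp [hp]⟩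
  rw [List.take_append, List.take_replicate]
  simp only [List.all_append, List.all_replicate]
  have h1 : k - 1 - (List.replicate (r - 1) p).length = 0 := by simp; omega
  rw [h1]
  simp

theorem pvAP_peel (k : Nat) (hk : 1 ≤ k) (p a : Option String) (l : List (Option String))
    (hne : a ≠ p) :
    ∀ r : Nat, (r < k ∨ p = some "Final Answer") →
      pvAP k (List.replicate r p ++ a :: l) = pvAP k (a :: l) := by
  intro r
  induction r with
  | zero => intro _; rfl
  | succ r ih =>
    intro hc
    rw [List.replicate_succ, List.cons_append]
    show ((decide (k ≤ (List.replicate r p ++ a :: l).length + 1) &&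
          (List.take (k - 1) (List.replicate r p ++ a :: l)).all (fun y => y == p)) &&
        !(p == some "Final Answer") || pvAP k (List.replicate r p ++ a :: l)) = pvAP k (a :: l)
    rw [ih (by rcases hc with h | h; exacts [Or.inl (by omega), Or.inr h])]
    have hfirst : ((decide (k ≤ (List.replicate r p ++ a :: l).length + 1) &&
          (List.take (k - 1) (List.replicate r p ++ a :: l)).all (fun y => y == p)) &&
        !(p == some "Final Answer")) = false := by
      rcases hc with h | h
      · -- r + 1 < k : the window contains a ≠ p
        have htake : List.take (k - 1) (List.replicate r p ++ a :: l)
            = List.replicate r p ++ List.take (k - 1 - r) (a :: l) := by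
          rw [List.take_append, List.take_replicate]
          congr 1
          · congr 1; omega
          · simp
        have h2 : k - 1 - r = (k - 2 - r) + 1 := by omega
        rw [htake, h2, List.take_succ_cons]
        simp only [List.all_append, List.all_cons]
        have : (a == p) = false := by simp [hne]
        simp [this]
      · simp [h]
    rw [hfirst, Bool.false_or]

theorem pvRun_inv (k : Nat) (hk : 1 ≤ k) :
    ∀ (l : List (Option String)) (r : Nat) (p : Option String), 1 ≤ r →
      (r < k ∨ p = some "Final Answer") →
      pvRunB (k : Int) l (r : Int) p = pvAP k (List.replicate r p ++ l) := by
  intro l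
  induction l with
  | nil =>
    intro r p hr hc
    rw [List.append_nil]
    rcases hc with h | h
    · exact (pvAP_short k _ (by simp; omega)).symm
    · rw [h]; exact (pvAP_FA k r).symm
  | cons a rest ih =>
    intro r p hr hc
    show (if (k : Int) ≤ (if (r : Int) ≠ 0 ∧ a = p then (r : Int) + 1 else 1) ∧
            a ≠ some "Final Answer" then true
          else pvRunB (k : Int) rest (if (r : Int) ≠ 0 ∧ a = p then (r : Int) + 1 else 1) a)
        = pvAP k (List.replicate r p ++ a :: rest)
    by_cases ha : a = p
    · have hrun : (if (r : Int) ≠ 0 ∧ a = p then (r : Int) + 1 else 1)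
          = ((r + 1 : Nat) : Int) := by
        rw [if_pos ⟨by exact_mod_cast Nat.one_le_iff_ne_zero.mp hr, ha⟩]
        push_cast; ring
      rw [hrun]
      have hlist : List.replicate r p ++ a :: rest
          = List.replicate (r + 1) p ++ rest := by
        rw [ha, List.replicate_succ']
        simp
      rw [hlist]
      by_cases hstop : (k : Int) ≤ ((r + 1 : Nat) : Int) ∧ a ≠ some "Final Answer"
      · rw [if_pos hstop]
        exact (pvAP_run_true k (r + 1) hk (by exact_mod_cast hstop.1) p
          (ha ▸ hstop.2) _).symm
      · rw [if_neg hstop]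
        rw [ha]
        apply ih (r + 1) p (by omega)
        rcases Decidable.not_and_iff_not_or_not.mp hstop with h | h
        · exact Or.inl (by omega)
        · exact Or.inr (ha ▸ not_not.mp h)
    · have hrun : (if (r : Int) ≠ 0 ∧ a = p then (r : Int) + 1 else 1)
          = ((1 : Nat) : Int) := by
        rw [if_neg (by intro hcon; exact ha hcon.2)]
        rfl
      rw [hrun]
      have hpeel := pvAP_peel k hk p a rest ha r hc
      rw [hpeel]
      by_cases hstop : (k : Int) ≤ ((1 : Nat) : Int) ∧ a ≠ some "Final Answer"
      · rw [if_pos hstop]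
        have hk1 : k = 1 := by
          have : (k : Int) ≤ 1 := hstop.1
          omega
        subst hk1
        show true = pvAP 1 (a :: rest)
        have := pvAP_run_true 1 1 le_rfl le_rfl a hstop.2 rest
        simpa using this.symm
      · rw [if_neg hstop]
        rw [ih 1 a le_rfl ?_]
        · rfl
        · rcases Decidable.not_and_iff_not_or_not.mp hstop with h | h
          · exact Or.inl (by
              have : ¬ ((k : Int) ≤ 1) := h
              omega)
          · exact Or.inr (not_not.mp h)

theorem pvRun_start (k : Nat) (hk : 1 ≤ k) (l : List (Option String)) :
    pvRunB (k : Int) l 0 none = pvAP k l := by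
  cases l with
  | nil => rfl
  | cons a rest =>
    show (if (k : Int) ≤ (if (0 : Int) ≠ 0 ∧ a = none then (0 : Int) + 1 else 1) ∧
            a ≠ some "Final Answer" then true
          else pvRunB (k : Int) rest (if (0 : Int) ≠ 0 ∧ a = none then (0 : Int) + 1 else 1) a)
        = pvAP k (a :: rest)
    have hrun : (if (0 : Int) ≠ 0 ∧ a = none then (0 : Int) + 1 else 1)
        = ((1 : Nat) : Int) := by
      rw [if_neg (by simp)]
      rfl
    rw [hrun]
    by_cases hstop : (k : Int) ≤ ((1 : Nat) : Int) ∧ a ≠ some "Final Answer"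
    · rw [if_pos hstop]
      have hk1 : k = 1 := by
        have : (k : Int) ≤ 1 := hstop.1
        omega
      subst hk1
      have := pvAP_run_true 1 1 le_rfl le_rfl a hstop.2 rest
      simpa using this.symm
    · rw [if_neg hstop]
      rw [pvRun_inv k hk rest 1 a le_rfl ?_]
      · rfl
      · rcases Decidable.not_and_iff_not_or_not.mp hstop with h | h
        · exact Or.inl (by
            have : ¬ ((k : Int) ≤ 1) := h
            omega)
        · exact Or.inr (not_not.mp h)

theorem pvWindow_eq (acts : List (Option String)) (k i : Nat) (h : i + k ≤ acts.length) :
    (List.range k).map (fun j => acts.getD (i + j) none) = (acts.drop i).take k := by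
  apply List.ext_getElem
  · simp; omega
  · intro j h1 h2
    simp [List.getD_eq_getElem?_getD,
      List.getElem?_eq_getElem (by simp at h1 ⊢; omega : i + j < acts.length)]

theorem pvSetLenOne (a : Option String) (t : List (Option String)) :
    ((PySem.Set.ofList (a :: t)).length = 1) ↔ ∀ y ∈ t, y = a := by
  rw [PySem.Set.ofList_cons]
  simp [List.length_eq_zero_iff, List.eq_nil_iff_forall_not_mem, PySem.Set.mem_discard,
    PySem.Set.mem_ofList]

theorem pvW_take (k : Nat) (hk : 1 ≤ k) (a : Option String) (rest : List (Option String))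
    (hlen : k ≤ rest.length + 1) :
    pvW (List.take k (a :: rest))
      = (decide (k ≤ rest.length + 1) && (rest.take (k - 1)).all (fun y => y == a) &&
        !(a == some "Final Answer")) := by
  have hks : k = (k - 1) + 1 := by omega
  rw [hks, List.take_succ_cons, ← hks]
  unfold pvW
  rw [Bool.eq_iff_iff]
  simp [pvSetLenOne, List.all_eq_true, hlen]

theorem pvAny_eq_AP (k : Nat) (hk : 1 ≤ k) :
    ∀ acts : List (Option String), k ≤ acts.length →
      ((List.range (acts.length - k + 1)).any (fun i => pvW (List.take k (List.drop i acts))))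
      = pvAP k acts := by
  intro acts
  induction acts with
  | nil => intro h; simp at h; omega
  | cons a rest ih =>
    intro h
    rw [List.range_succ_eq_map, List.any_cons, List.any_map]
    show (pvW (List.take k (List.drop 0 (a :: rest))) ||
        (List.range ((a :: rest).length - k)).any
          ((fun i => pvW (List.take k (List.drop i (a :: rest)))) ∘ Nat.succ)) = pvAP k (a :: rest)
    rw [show ((fun i => pvW (List.take k (List.drop i (a :: rest)))) ∘ Nat.succ)
        = (fun i => pvW (List.take k (List.drop i rest))) from rfl]
    have hhead : pvW (List.take k (List.drop 0 (a :: rest)))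
        = (decide (k ≤ rest.length + 1) && (rest.take (k - 1)).all (fun y => y == a) &&
          !(a == some "Final Answer")) := by
      rw [List.drop_zero]
      exact pvW_take k hk a rest (by simpa using h)
    rw [hhead]
    by_cases hk2 : k ≤ rest.length
    · rw [show (a :: rest).length - k = rest.length - k + 1 from by simp; omega, ih hk2]
      conv_rhs => rw [pvAP]
    · rw [show (a :: rest).length - k = 0 from by simp; omega]
      simp only [List.range_zero, List.any_nil, Bool.or_false]
      conv_rhs => rw [pvAP]
      rw [pvAP_short k rest (by omega)]
      simp

theorem pvActsD (trace : List (List (String × String))) (m : Nat) :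
    (trace.map pvAct).getD m none = pvAct (PySem.List.pyGetD trace (m : Int) []) := by
  rw [PySem.List.pyGetD_natCast]
  have : (none : Option String) = pvAct [] := rfl
  rw [this, List.getD_map]

theorem pvPhase1_bridge (trace : List (List (String × String))) (k : Nat) (hk : 1 ≤ k)
    (hn : k ≤ trace.length) :
    ((PySem.List.pyRange 0 ((trace.length : Int) - (k : Int) + 1) 1).any (fun i =>
      let actions := (PySem.List.pyRange 0 ((k : Nat) : Int) 1).map
        (fun j => pvAct (PySem.List.pyGetD trace (i + j) []))
      decide ((PySem.Set.ofList actions).length = 1) &&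
        !(actions.headD none == some "Final Answer")))
    = pvAP k (trace.map pvAct) := by
  have hcast : (trace.length : Int) - (k : Int) + 1 = ((trace.length - k + 1 : Nat) : Int) := by
    push_cast [Nat.cast_sub hn]
    ring
  rw [hcast, PySem.List.pyRange_zero_natCast, List.any_map]
  rw [← pvAny_eq_AP k hk (trace.map pvAct) (by simpa using hn)]
  rw [show (trace.map pvAct).length = trace.length from by simp]
  apply PySem.List.any_congr_mem
  intro i hi
  have hik : i + k ≤ trace.length := by
    rw [List.mem_range] at hi
    omega
  show ((fun i : Int =>
      let actions := (PySem.List.pyRange 0 ((k : Nat) : Int) 1).map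
        (fun j => pvAct (PySem.List.pyGetD trace (i + j) []))
      decide ((PySem.Set.ofList actions).length = 1) &&
        !(actions.headD none == some "Final Answer")) ((i : Nat) : Int))
    = pvW (List.take k (List.drop i (trace.map pvAct)))
  simp only
  have hacts : (PySem.List.pyRange 0 ((k : Nat) : Int) 1).map
      (fun j => pvAct (PySem.List.pyGetD trace (((i : Nat) : Int) + j) []))
      = List.take k (List.drop i (trace.map pvAct)) := by
    rw [PySem.List.pyRange_zero_natCast, List.map_map]
    rw [← pvWindow_eq (trace.map pvAct) k i (by simpa using hik)]
    apply List.map_congr_left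
    intro j hj
    show pvAct (PySem.List.pyGetD trace (((i : Nat) : Int) + ((j : Nat) : Int)) [])
      = (trace.map pvAct).getD (i + j) none
    rw [show ((i : Nat) : Int) + ((j : Nat) : Int) = (((i + j : Nat)) : Int) from by push_cast; ring]
    exact (pvActsD trace (i + j)).symm
  rw [hacts]
  rfl

theorem pvCycle_eq (trace : List (List (String × String))) :
    pvCycleB (trace.map pvAct) = pvCycle trace := by
  unfold pvCycle pvCycleB
  rw [show (trace.map pvAct).length = trace.length from by simp]
  apply PySem.List.any_congr_mem
  intro i hi
  have hb := PySem.List.mem_pyRange_one.mp hi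
  obtain ⟨m, rfl⟩ : ∃ m : Nat, i = (m : Int) := ⟨i.toNat, by omega⟩
  have key : ∀ c : Nat, PySem.List.pyGetD (trace.map pvAct) (((m + c : Nat)) : Int) none
      = pvAct (PySem.List.pyGetD trace (((m + c : Nat)) : Int) []) := by
    intro c
    rw [PySem.List.pyGetD_natCast]
    exact pvActsD trace (m + c)
  have e0 : ((m : Int)) = (((m + 0 : Nat)) : Int) := by push_cast; ring
  have e1 : ((m : Int) + 1) = (((m + 1 : Nat)) : Int) := by push_cast; ring
  have e2 : ((m : Int) + 2) = (((m + 2 : Nat)) : Int) := by push_cast; ring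
  have e3 : ((m : Int) + 3) = (((m + 3 : Nat)) : Int) := by push_cast; ring
  have e4 : ((m : Int) + 4) = (((m + 4 : Nat)) : Int) := by push_cast; ring
  simp only [e1, e2, e3, e4]
  simp only [e0]
  simp only [key]

-- ===== VERDICT (by name: the statement is the Claim_ definition above) =====
theorem detect_infinite_loop_spec : Claim_equal_detect_infinite_loop := by
  intro trace thr _
  unfold Spec_detect_infinite_loop detect_infinite_loop detect_infinite_loop_alt
  dsimp only
  by_cases hlt : (trace.length : Int) < thr
  · simp [hlt]
  · rw [if_neg hlt, if_neg hlt]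
    by_cases hpos : 1 ≤ thr
    · obtain ⟨k, rfl⟩ : ∃ k : Nat, thr = (k : Int) := ⟨thr.toNat, by omega⟩
      have hk : 1 ≤ k := by exact_mod_cast hpos
      have hn : k ≤ trace.length := by omega
      rw [pvRun_start k hk (trace.map pvAct), ← pvPhase1_bridge trace k hk hn,
        ← pvCycle_eq trace]
      simp [hpos]
    · -- repeat_threshold ≤ 0 : the repetition check is vacuous on both sides
      have hempty : PySem.List.pyRange 0 thr 1 = [] := by
        simp [PySem.List.pyRange]
        omega
      simp only [hempty, List.map_nil]
      rw [← pvCycle_eq trace]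
      simp [hpos, PySem.Set.ofList]
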